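-- pv_equiv track=rewrite | github.com/Manasarow/Investment_RAG | src/chunk/hierarchical_chunker.py | _assign_pseudo_pages_to_items
-- ===== SOURCE A (Python) =====
-- def _assign_pseudo_pages_to_items(
--     items: list[dict],
--     form_type: str = "",
-- ) -> list[dict]:
--     """
--     Assign pseudo-page numbers to HTM items based on their block_order position.
--     Items must be sorted by block_order before this is called.
--
--     BLOCKS_PER_PAGE is computed dynamically:
--         BPP = max(MIN_BLOCKS_PER_PAGE, total_items // target_pages_for_form)
--
--     Target pages: 10-K→80, 10-Q→40, 8-K→10, DEF14A→60, default→30.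
--     This ensures a 707-block 10-K maps to ~88 pseudo-pages instead of 15.
--     """
--     if not items:
--         return items
--
--     _TARGET: dict[str, int] = {
--         "10-K": 80, "10-K405": 80, "10-KSB": 80,
--         "10-Q": 40, "8-K": 10, "DEF14A": 60,
--     }
--     ft = (form_type or "").upper()
--     target_pages = next((v for k, v in _TARGET.items() if ft.startswith(k)), 30)
--     blocks_per_page = max(3, len(items) // target_pages)
--
--     for i, item in enumerate(items):
--         item["page"] = max(1, (i // blocks_per_page) + 1)
--     return items
-- ===== SOURCE B (Python) =====
-- def _assign_pseudo_pages_to_items(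
--     items: list[dict],
--     form_type: str = "",
-- ) -> list[dict]:
--     """Chunked variant: group consecutive blocks into pages with a running
--     page counter instead of dividing each index."""
--     if not items:
--         return items
--
--     _TARGET: dict[str, int] = {
--         "10-K": 80, "10-K405": 80, "10-KSB": 80,
--         "10-Q": 40, "8-K": 10, "DEF14A": 60,
--     }
--     ft = (form_type or "").upper()
--     target_pages = next((v for k, v in _TARGET.items() if ft.startswith(k)), 30)
--     blocks_per_page = max(3, len(items) // target_pages)
--
--     page = 1
--     for start in range(0, len(items), blocks_per_page):
--         for item in items[start:start + blocks_per_page]: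
--             item["page"] = page
--         page += 1
--     return items
-- ===== Notes on version B (the rewrite author's own statement) =====
-- stated objective: alternative
-- what changed: Replaced the per-item index-division loop (page = i // blocks_per_page + 1 for each i) with a chunked double loop that walks the list in slices of blocks_per_page consecutive items, stamping each slice with a running page counter.
import Mathlib
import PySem

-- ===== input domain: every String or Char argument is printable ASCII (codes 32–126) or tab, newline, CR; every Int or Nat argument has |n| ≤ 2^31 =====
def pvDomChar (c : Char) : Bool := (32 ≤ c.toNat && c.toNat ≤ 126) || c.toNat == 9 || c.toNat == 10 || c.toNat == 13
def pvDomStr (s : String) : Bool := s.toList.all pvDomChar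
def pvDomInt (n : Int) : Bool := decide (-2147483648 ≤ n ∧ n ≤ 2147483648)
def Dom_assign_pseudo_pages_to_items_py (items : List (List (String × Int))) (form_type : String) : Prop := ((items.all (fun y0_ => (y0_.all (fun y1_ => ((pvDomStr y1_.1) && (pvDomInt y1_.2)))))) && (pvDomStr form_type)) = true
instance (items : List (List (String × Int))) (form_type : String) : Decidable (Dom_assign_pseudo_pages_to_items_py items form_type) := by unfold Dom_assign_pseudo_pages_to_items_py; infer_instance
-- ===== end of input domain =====

-- B groups consecutive blocks into pages with a running page counter (chunked double loop)
-- instead of dividing each index; same cost, alternative decomposition. Return value only: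
-- both Pythons mutate the item dicts in place and return the same list object.

-- shared helper: Python's dict assignment item["page"] = v on an association list
-- (overwrite the first matching key in place, else append)
def pySetItem : List (String × Int) → String → Int → List (String × Int)
  | [], k, v => [(k, v)]
  | (k', v') :: rest, k, v =>
      if k' == k then (k', v) :: rest else (k', v') :: pySetItem rest k v

-- the _TARGET table, in Python insertion order
def pvTargetTable : List (String × Int) :=
  [("10-K", 80), ("10-K405", 80), ("10-KSB", 80), ("10-Q", 40), ("8-K", 10), ("DEF14A", 60)]

-- ===== PORT A =====
def assign_pseudo_pages_to_items_py (items : List (List (String × Int))) (form_type : String) : List (List (String × Int)) :=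
  match items with
  | [] => items
  | _ :: _ =>
    let ft := PySem.Str.upper form_type
    let target_pages : Int :=
      match pvTargetTable.find? (fun kv => PySem.Str.startswith ft kv.1) with
      | some kv => kv.2
      | none => 30
    let blocks_per_page : Int := max 3 (PySem.Int.floordiv (items.length : Int) target_pages)
    (PySem.List.enumerate items 0).map
      (fun p => pySetItem p.2 "page" (max 1 (PySem.Int.floordiv p.1 blocks_per_page + 1)))

-- ===== PORT B =====
-- the chunked double loop of Source B: assign `page` to one slice of length bpp, recurse on the rest
-- (bppPred + 1 = blocks_per_page, which is always ≥ 3 in B)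
def pvChunkAssign (bppPred : Nat) (l : List (List (String × Int))) (page : Int) : List (List (String × Int)) :=
  match l with
  | [] => []
  | x :: xs =>
      ((x :: xs).take (bppPred + 1)).map (fun item => pySetItem item "page" page)
        ++ pvChunkAssign bppPred ((x :: xs).drop (bppPred + 1)) (page + 1)
  termination_by l.length
  decreasing_by simp [List.length_drop]

def assign_pseudo_pages_to_items_py_alt (items : List (List (String × Int))) (form_type : String) : List (List (String × Int)) :=
  match items with
  | [] => items
  | _ :: _ =>
    let ft := PySem.Str.upper form_type
    let target_pages : Int :=
      match pvTargetTable.find? (fun kv => PySem.Str.startswith ft kv.1) with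
      | some kv => kv.2
      | none => 30
    let blocks_per_page : Int := max 3 (PySem.Int.floordiv (items.length : Int) target_pages)
    pvChunkAssign (blocks_per_page.toNat - 1) items 1

-- ===== PRECONDITION & SPEC =====
def Spec_assign_pseudo_pages_to_items_py (items : List (List (String × Int))) (form_type : String) (out : List (List (String × Int))) : Prop := out = assign_pseudo_pages_to_items_py_alt items form_type
instance (items : List (List (String × Int))) (form_type : String) (out : List (List (String × Int))) : Decidable (Spec_assign_pseudo_pages_to_items_py items form_type out) := by unfold Spec_assign_pseudo_pages_to_items_py; infer_instance

-- ===== CLAIM (what is proved, stated in full; the proofs are below) =====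
def Claim_equal_assign_pseudo_pages_to_items_py : Prop := ∀ (items : List (List (String × Int))) (form_type : String), Dom_assign_pseudo_pages_to_items_py items form_type → Spec_assign_pseudo_pages_to_items_py items form_type (assign_pseudo_pages_to_items_py items form_type)

-- ===== LEMMAS AND PROOFS =====

lemma pvChunkAssign_nil (p : Nat) (page : Int) : pvChunkAssign p [] page = [] := by
  rw [pvChunkAssign]

lemma pvChunkAssign_cons (p : Nat) (x : List (String × Int)) (xs : List (List (String × Int))) (page : Int) :
    pvChunkAssign p (x :: xs) page
      = ((x :: xs).take (p + 1)).map (fun item => pySetItem item "page" page)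
        ++ pvChunkAssign p ((x :: xs).drop (p + 1)) (page + 1) := by
  rw [pvChunkAssign]

-- chunked assignment = per-index division: pvChunkAssign with chunk size p+1,
-- starting at `page`, tags item i with page + i / (p+1)
lemma pvChunkAssign_eq_mapIdx (p : Nat) : ∀ (n : Nat) (l : List (List (String × Int))), l.length ≤ n →
    ∀ page : Int, pvChunkAssign p l page
      = l.mapIdx (fun i it => pySetItem it "page" (page + ((i / (p + 1) : Nat) : Int))) := by
  intro n
  induction n with
  | zero =>
    intro l hl page
    have : l = [] := List.length_eq_zero_iff.mp (Nat.le_zero.mp hl)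
    subst this
    simp [pvChunkAssign_nil]
  | succ n ih =>
    intro l hl page
    cases l with
    | nil => simp [pvChunkAssign_nil]
    | cons x xs =>
      rw [pvChunkAssign_cons]
      rw [ih ((x :: xs).drop (p + 1)) (by simp [List.length_drop] at hl ⊢; omega) (page + 1)]
      conv_rhs => rw [← List.take_append_drop (p + 1) (x :: xs), List.mapIdx_append]
      congr 1
      · apply List.ext_getElem (by simp)
        intro i h1 h2
        have hi : i < p + 1 := by
          simp [List.length_take] at h1
          omega
        simp only [List.getElem_map, List.getElem_mapIdx, Nat.div_eq_of_lt hi]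
        simp
      · apply List.ext_getElem (by simp)
        intro j h1 h2
        have hj : j < ((x :: xs).drop (p + 1)).length := by simpa using h1
        have hlen : ((x :: xs).take (p + 1)).length = p + 1 := by
          simp [List.length_drop] at hj
          simp [List.length_take]
          omega
        simp only [List.getElem_mapIdx, hlen]
        have hdiv : (j + (p + 1)) / (p + 1) = j / (p + 1) + 1 :=
          Nat.add_div_right j (Nat.succ_pos p)
        rw [hdiv]
        congr 1
        push_cast
        ring

-- A's enumerate-and-divide map equals B's chunked recursion, for any bpp ≥ 3
lemma enum_map_eq_chunks (l : List (List (String × Int))) (bpp : Int) (h3 : (3 : Int) ≤ bpp) :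
    (PySem.List.enumerate l 0).map
        (fun p => pySetItem p.2 "page" (max 1 (PySem.Int.floordiv p.1 bpp + 1)))
      = pvChunkAssign (bpp.toNat - 1) l 1 := by
  have hb : bpp.toNat - 1 + 1 = bpp.toNat := by omega
  rw [pvChunkAssign_eq_mapIdx (bpp.toNat - 1) l.length l le_rfl 1, hb]
  apply List.ext_getElem (by simp [PySem.List.length_enumerate])
  intro i h1 h2
  simp only [List.getElem_map, PySem.List.getElem_enumerate, List.getElem_mapIdx]
  congr 1
  have hfd : PySem.Int.floordiv ((i : Nat) : Int) bpp = ((i / bpp.toNat : Nat) : Int) := by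
    conv_lhs => rw [show bpp = ((bpp.toNat : Nat) : Int) by omega]
    exact PySem.Int.floordiv_natCast i bpp.toNat
  rw [zero_add, hfd]
  have : (0 : Int) ≤ ((i / bpp.toNat : Nat) : Int) := Int.natCast_nonneg _
  omega

-- ===== VERDICT (by name: the statement is the Claim_ definition above) =====
theorem assign_pseudo_pages_to_items_py_spec : Claim_equal_assign_pseudo_pages_to_items_py := by
  intro items form_type _
  unfold Spec_assign_pseudo_pages_to_items_py
  cases items with
  | nil => rfl
  | cons x xs =>
    simp only [assign_pseudo_pages_to_items_py, assign_pseudo_pages_to_items_py_alt]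
    exact enum_map_eq_chunks (x :: xs) _ (le_max_left _ _)
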